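-- pv_equiv track=rewrite | github.com/TianaSkorokhodova/Algo_level1_Python | task14/LineAnalysis.py | LineAnalysis
-- ===== SOURCE A (Python) =====
-- def LineAnalysis (line) :
--     pointCounter = 0
--     prevPoint = -1
--     result = True
--
--     for i in range (1, len(line)) :
--
--         if line[i] == "." :
--             pointCounter += 1
--         if line[i] == "*" :
--
--             if prevPoint != -1 and prevPoint != pointCounter :
--                 result = False
--                 break
--             prevPoint = pointCounter
--             pointCounter = 0
--
--     return result
-- ===== SOURCE B (Python) =====
-- def LineAnalysis(line):
--     counts = [seg.count('.') for seg in line[1:].split('*')[:-1]]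
--     return len(set(counts)) <= 1
-- ===== Notes on version B (the rewrite author's own statement) =====
-- stated objective: simpler
-- what changed: Replaces A's single-pass delimiter state machine (pointCounter/prevPoint with early break) by splitting the string after its first character on the asterisk delimiter and checking that the dot counts of all non-trailing segments are equal via a set; the per-character Python loop is replaced by C-implemented str.split/str.count, a constant-factor speedup.
import Mathlib
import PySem

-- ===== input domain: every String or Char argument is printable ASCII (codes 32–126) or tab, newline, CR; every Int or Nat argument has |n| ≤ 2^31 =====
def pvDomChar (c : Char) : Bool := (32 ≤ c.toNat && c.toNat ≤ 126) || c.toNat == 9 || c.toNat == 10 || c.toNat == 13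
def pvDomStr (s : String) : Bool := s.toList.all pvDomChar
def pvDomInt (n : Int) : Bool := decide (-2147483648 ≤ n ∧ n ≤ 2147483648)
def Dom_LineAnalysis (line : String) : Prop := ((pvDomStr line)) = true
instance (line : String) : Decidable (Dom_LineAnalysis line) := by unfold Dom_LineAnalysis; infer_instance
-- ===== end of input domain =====

-- B replaces A's single-pass delimiter state machine (with early break) by split-on-'*'
-- then comparing the dot counts of the non-trailing segments; objective: simpler.

-- ===== PORT A =====
-- the for-loop of A over line[1:]; state = (pointCounter, prevPoint); returning false = A's break with result = False
def pvLoopA : List Char → Int → Int → Bool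
  | [], _, _ => true
  | c :: rest, pointCounter, prevPoint =>
    let pc := if c = '.' then pointCounter + 1 else pointCounter
    if c = '*' then
      if prevPoint ≠ -1 ∧ prevPoint ≠ pc then false
      else pvLoopA rest 0 pc
    else pvLoopA rest pc prevPoint

def LineAnalysis (line : String) : Bool := pvLoopA (line.toList.drop 1) 0 (-1)

-- ===== PORT B =====
-- line[1:].split('*') = List.splitOn '*' on the chars; seg.count('.') = List.count '.'; set → PySem.Set
def LineAnalysis_alt (line : String) : Bool :=
  let parts := (line.toList.drop 1).splitOn '*'
  let counts := parts.dropLast.map (fun seg => (seg.count '.' : Int))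
  decide ((PySem.Set.ofList counts).length ≤ 1)

-- ===== PRECONDITION & SPEC =====
def Spec_LineAnalysis (line : String) (out : Bool) : Prop := out = LineAnalysis_alt line
instance (line : String) (out : Bool) : Decidable (Spec_LineAnalysis line out) := by unfold Spec_LineAnalysis; infer_instance

-- ===== CLAIM (what is proved, stated in full; the proofs are below) =====
def Claim_equal_LineAnalysis : Prop := ∀ (line : String), Dom_LineAnalysis line → Spec_LineAnalysis line (LineAnalysis line)

-- ===== LEMMAS AND PROOFS =====

-- dot counts of the non-trailing '*'-segments of cs (B's `counts`)
def pvCounts (cs : List Char) : List Int :=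
  (cs.splitOn '*').dropLast.map (fun seg => (seg.count '.' : Int))

-- add pc to the first element (A's pointCounter carried into the current segment)
def pvAddFirst (pc : Int) : List Int → List Int
  | [] => []
  | x :: xs => (pc + x) :: xs

-- A's comparison chain on the list of segment counts
def pvChk : Int → List Int → Bool
  | _, [] => true
  | prev, x :: xs => if prev ≠ -1 ∧ prev ≠ x then false else pvChk x xs

theorem pvAddFirst_zero (l : List Int) : pvAddFirst 0 l = l := by
  cases l <;> simp [pvAddFirst]

theorem pvAddFirst_addFirst (a b : Int) (l : List Int) :
    pvAddFirst a (pvAddFirst b l) = pvAddFirst (a + b) l := by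
  cases l with
  | nil => rfl
  | cons x xs => simp [pvAddFirst]; ring

theorem pvLoopA_cons (c : Char) (rest : List Char) (pc prev : Int) :
    pvLoopA (c :: rest) pc prev =
      (let pc1 := if c = '.' then pc + 1 else pc;
       if c = '*' then
         if prev ≠ -1 ∧ prev ≠ pc1 then false else pvLoopA rest 0 pc1
       else pvLoopA rest pc1 prev) := rfl

theorem pvCounts_nil : pvCounts [] = [] := by
  simp [pvCounts, List.splitOn, List.splitOnP_nil]

theorem pvCounts_star (cs : List Char) : pvCounts ('*' :: cs) = 0 :: pvCounts cs := by
  simp only [pvCounts, List.splitOn, List.splitOnP_cons]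
  rw [if_pos (by simp)]
  rw [List.dropLast_cons_of_ne_nil (List.splitOnP_ne_nil _ cs)]
  simp

theorem pvCounts_cons (c : Char) (cs : List Char) (hc : c ≠ '*') :
    pvCounts (c :: cs) = pvAddFirst (if c = '.' then 1 else 0) (pvCounts cs) := by
  simp only [pvCounts, List.splitOn, List.splitOnP_cons]
  rw [if_neg (by simp [hc])]
  obtain ⟨p, rest, hpr⟩ := List.exists_cons_of_ne_nil (List.splitOnP_ne_nil (· == '*') cs)
  rw [hpr]
  cases rest with
  | nil => simp [pvAddFirst]
  | cons q qs =>
    simp only [List.modifyHead_cons, List.dropLast_cons₂, List.map_cons, pvAddFirst,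
      List.count_cons]
    by_cases hd : c = '.' <;> simp [hd] <;> omega

theorem pvLoopA_eq_chk (cs : List Char) (pc prev : Int) :
    pvLoopA cs pc prev = pvChk prev (pvAddFirst pc (pvCounts cs)) := by
  induction cs generalizing pc prev with
  | nil => simp [pvLoopA, pvCounts_nil, pvAddFirst, pvChk]
  | cons c cs ih =>
    by_cases hc : c = '*'
    · subst hc
      rw [pvCounts_star, pvLoopA_cons]
      simp only [pvAddFirst, pvChk, add_zero,
        if_neg (by decide : ¬ ('*' : Char) = '.')]
      split_ifs with h h'
      all_goals first | rfl | rw [ih, pvAddFirst_zero]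
    · rw [pvCounts_cons c cs hc, pvAddFirst_addFirst]
      simp only [pvLoopA, if_neg hc]
      by_cases hd : c = '.'
      · simp only [if_pos hd, ih]
      · simp only [if_neg hd, ih, add_zero]

theorem pvChk_of_ne_neg_one (xs : List Int) (x : Int) (hx : x ≠ -1) :
    pvChk x xs = decide (∀ y ∈ xs, y = x) := by
  induction xs generalizing x with
  | nil => simp [pvChk]
  | cons y ys ih =>
    simp only [pvChk]
    by_cases hxy : x = y
    · subst hxy
      rw [if_neg (by simp), ih x hx]
      simp
    · rw [if_pos ⟨hx, hxy⟩]
      symm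
      simp only [decide_eq_false_iff_not]
      intro h
      exact hxy (h y (by simp)).symm

theorem pvSet_length_le_one (x : Int) (xs : List Int) :
    (PySem.Set.ofList (x :: xs)).length ≤ 1 ↔ ∀ y ∈ xs, y = x := by
  constructor
  · intro h y hy
    have hxm : x ∈ PySem.Set.ofList (x :: xs) := (PySem.Set.mem_ofList _ _).2 (by simp)
    have hym : y ∈ PySem.Set.ofList (x :: xs) := (PySem.Set.mem_ofList _ _).2 (by simp [hy])
    match hS : PySem.Set.ofList (x :: xs) with
    | [] => rw [hS] at hxm; simp at hxm
    | [z] =>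
      rw [hS] at hxm hym; simp at hxm hym; omega
    | a :: b :: t => rw [hS] at h; simp at h
  · intro h
    have hnd := PySem.Set.nodup_ofList (x :: xs)
    have hall : ∀ z ∈ PySem.Set.ofList (x :: xs), z = x := by
      intro z hz
      have := (PySem.Set.mem_ofList _ _).1 hz
      rcases List.mem_cons.1 this with h1 | h2
      · exact h1
      · exact h z h2
    match hS : PySem.Set.ofList (x :: xs) with
    | [] => simp
    | [z] => simp
    | a :: b :: t =>
      exfalso
      rw [hS] at hnd hall
      have ha : a = x := hall a (by simp)
      have hb : b = x := hall b (by simp)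
      simp [ha, hb] at hnd

theorem pvChk_neg_one (l : List Int) (hl : ∀ x ∈ l, 0 ≤ x) :
    pvChk (-1) l = decide ((PySem.Set.ofList l).length ≤ 1) := by
  cases l with
  | nil => rfl
  | cons x xs =>
    simp only [pvChk]
    rw [if_neg (by simp : ¬ ((-1 : Int) ≠ -1 ∧ (-1 : Int) ≠ x))]
    rw [pvChk_of_ne_neg_one xs x (by have := hl x (by simp); omega)]
    rw [decide_eq_decide]
    exact (pvSet_length_le_one x xs).symm

-- ===== VERDICT (by name: the statement is the Claim_ definition above) =====
theorem LineAnalysis_spec : Claim_equal_LineAnalysis := by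
  intro line _
  unfold Spec_LineAnalysis LineAnalysis LineAnalysis_alt
  rw [pvLoopA_eq_chk, pvAddFirst_zero]
  exact pvChk_neg_one _ (by
    intro x hx
    simp only [pvCounts, List.mem_map] at hx
    obtain ⟨seg, -, rfl⟩ := hx
    exact Int.natCast_nonneg _)
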